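-- pv_equiv track=rewrite | github.com/pypi-data/pypi-mirror-403 | packages/contextfs/contextfs-0.2.34.tar.gz/contextfs-0.2.34/src/contextfs/filetypes/handlers/ruby.py | _find_line_doc_comment
-- ===== SOURCE A (Python) =====
-- def _find_line_doc_comment(lines: list[str], line_idx: int) -> str | None:
--     """Find doc comment on preceding lines."""
--     doc_lines = []
--     for i in range(line_idx - 1, -1, -1):
--         line = lines[i].strip()
--         if line.startswith("#"):
--             doc_lines.insert(0, line[1:].strip())
--         elif not line:
--             continue
--         else:
--             break
--     return "\n".join(doc_lines) if doc_lines else None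
-- ===== SOURCE B (Python) =====
-- def _find_line_doc_comment(lines, line_idx):
--     """Find doc comment on preceding lines (single forward scan, reset on code)."""
--     doc_lines = []
--     for line in lines[:max(line_idx, 0)]:
--         line = line.strip()
--         if line.startswith("#"):
--             doc_lines.append(line[1:].strip())
--         elif line:
--             doc_lines = []
--     return "\n".join(doc_lines) if doc_lines else None
-- ===== Notes on version B (the rewrite author's own statement) =====
-- stated objective: alternative
-- what changed: Replaces A's backward index scan with break and O(k) insert(0) by a single forward scan over the clamped prefix that appends comment payloads and resets the accumulator on a code line.
import Mathlib
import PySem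

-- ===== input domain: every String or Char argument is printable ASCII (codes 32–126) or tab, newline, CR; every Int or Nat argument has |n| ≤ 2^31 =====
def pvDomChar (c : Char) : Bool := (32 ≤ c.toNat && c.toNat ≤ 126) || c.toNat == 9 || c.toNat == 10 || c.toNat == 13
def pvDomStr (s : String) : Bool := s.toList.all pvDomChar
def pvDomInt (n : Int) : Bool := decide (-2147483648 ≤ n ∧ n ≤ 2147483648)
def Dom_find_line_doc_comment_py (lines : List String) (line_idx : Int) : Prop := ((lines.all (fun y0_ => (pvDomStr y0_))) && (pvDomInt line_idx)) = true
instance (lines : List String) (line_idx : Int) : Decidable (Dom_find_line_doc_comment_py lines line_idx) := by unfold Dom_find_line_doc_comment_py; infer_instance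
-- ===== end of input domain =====

-- B replaces A's backward scan (with O(n) insert(0) and break) by a single forward scan over the
-- clamped prefix with an accumulator reset on code lines; equivalence of the return values is proved
-- on Pre_ (A raises IndexError outside it). Neither program mutates its arguments.

-- ===== PORT A =====
-- line[1:].strip() applied to an already stripped line
def pvStripHash (s : String) : String := PySem.Str.strip (PySem.Str.slice s (some 1) none)

-- 'for i in range(line_idx - 1, -1, -1)': the counter n+1 stands for current index n;
-- pyGet? = lines[i]; none (IndexError) is excluded by Pre_, the loop state is returned as-is there.
def pvALoop (lines : List String) : Nat → List String → List String
  | 0, acc => acc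
  | n + 1, acc =>
    match PySem.List.pyGet? lines (n : Int) with
    | none => acc
    | some l =>
      let s := PySem.Str.strip l
      if PySem.Str.startswith s "#" then pvALoop lines n (pvStripHash s :: acc)  -- insert(0, …)
      else if s = "" then pvALoop lines n acc
      else acc  -- break

def find_line_doc_comment_py (lines : List String) (line_idx : Int) : Option String :=
  let doc := pvALoop lines line_idx.toNat []  -- range(line_idx-1,-1,-1) has line_idx iterations (0 if line_idx ≤ 0)
  if doc ≠ [] then some (PySem.Str.join "\n" doc) else none

-- ===== PORT B =====
def pvBLoop : List String → List String → List String
  | [], acc => acc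
  | l :: rest, acc =>
    let s := PySem.Str.strip l
    if PySem.Str.startswith s "#" then pvBLoop rest (acc ++ [pvStripHash s])
    else if s ≠ "" then pvBLoop rest []  -- code line: reset
    else pvBLoop rest acc

def find_line_doc_comment_py_alt (lines : List String) (line_idx : Int) : Option String :=
  let doc := pvBLoop (PySem.List.slice lines none (some (max line_idx 0))) []  -- lines[:max(line_idx, 0)]
  if doc ≠ [] then some (PySem.Str.join "\n" doc) else none

-- ===== PRECONDITION & SPEC =====
-- A raises IndexError as soon as line_idx - 1 ≥ len(lines); exactly those inputs are excluded.
def Pre_find_line_doc_comment_py (lines : List String) (line_idx : Int) : Prop :=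
  line_idx ≤ (lines.length : Int)
instance (lines : List String) (line_idx : Int) : Decidable (Pre_find_line_doc_comment_py lines line_idx) := by unfold Pre_find_line_doc_comment_py; infer_instance

def pvWitness_find_line_doc_comment_py : List String × Int := (["# hi", "x"], 1)

def Spec_find_line_doc_comment_py (lines : List String) (line_idx : Int) (out : Option String) : Prop := out = find_line_doc_comment_py_alt lines line_idx
instance (lines : List String) (line_idx : Int) (out : Option String) : Decidable (Spec_find_line_doc_comment_py lines line_idx out) := by unfold Spec_find_line_doc_comment_py; infer_instance

-- ===== CLAIM (what is proved, stated in full; the proofs are below) =====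
def Claim_equal_find_line_doc_comment_py : Prop := ∀ (lines : List String) (line_idx : Int), Dom_find_line_doc_comment_py lines line_idx → Pre_find_line_doc_comment_py lines line_idx → Spec_find_line_doc_comment_py lines line_idx (find_line_doc_comment_py lines line_idx)

-- ===== LEMMAS AND PROOFS =====

-- Common spine of both loops: processes the reversed prefix (latest line first),
-- returning (collected doc block in forward order, whether a code line broke the scan).
def pvSpine : List String → List String × Bool
  | [] => ([], false)
  | l :: rest =>
    let s := PySem.Str.strip l
    if PySem.Str.startswith s "#" then
      ((pvSpine rest).1 ++ [pvStripHash s], (pvSpine rest).2)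
    else if s = "" then pvSpine rest
    else ([], true)

lemma pvALoop_eq_spine (lines : List String) :
    ∀ (n : Nat) (acc : List String), n ≤ lines.length →
      pvALoop lines n acc = (pvSpine ((lines.take n).reverse)).1 ++ acc := by
  intro n
  induction n with
  | zero => intro acc _; simp [pvALoop, pvSpine]
  | succ n ih =>
    intro acc h
    have hn : n < lines.length := by omega
    have hget : PySem.List.pyGet? lines (n : Int) = some lines[n] :=
      PySem.List.pyGet?_ofNat lines n hn
    have htake : (lines.take (n + 1)).reverse = lines[n] :: (lines.take n).reverse := by
      rw [List.take_add_one]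
      simp [List.getElem?_eq_getElem hn]
    rw [htake]
    simp only [pvALoop, hget, pvSpine]
    split_ifs with h1 h2
    · rw [ih _ (by omega)]; simp
    · exact ih _ (by omega)
    · simp

lemma pvSpine_append (zs : List String) (l : String) :
    pvSpine (zs ++ [l]) =
      if (pvSpine zs).2 then pvSpine zs
      else
        if PySem.Str.startswith (PySem.Str.strip l) "#" then
          (pvStripHash (PySem.Str.strip l) :: (pvSpine zs).1, false)
        else if PySem.Str.strip l = "" then pvSpine zs
        else ((pvSpine zs).1, true) := by
  induction zs with
  | nil => simp [pvSpine]
  | cons z rest ih =>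
    simp only [List.cons_append, pvSpine]
    split_ifs with h1 h2 <;> simp_all

lemma pvBLoop_eq_spine :
    ∀ (xs acc : List String),
      pvBLoop xs acc =
        (if (pvSpine xs.reverse).2 then [] else acc) ++ (pvSpine xs.reverse).1 := by
  intro xs
  induction xs with
  | nil => intro acc; simp [pvBLoop, pvSpine]
  | cons l rest ih =>
    intro acc
    have hrev : (l :: rest).reverse = rest.reverse ++ [l] := by simp
    rw [hrev, pvSpine_append]
    simp only [pvBLoop]
    split_ifs with h1 h2 h3 h4 h5 <;> simp_all

theorem find_line_doc_comment_py_spec : Claim_equal_find_line_doc_comment_py := by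
  intro lines line_idx _ hpre
  unfold Spec_find_line_doc_comment_py
  unfold find_line_doc_comment_py find_line_doc_comment_py_alt
  have hmax : (0 : Int) ≤ max line_idx 0 := le_max_right _ _
  have hslice : PySem.List.slice lines none (some (max line_idx 0)) =
      lines.take line_idx.toNat := by
    rw [PySem.List.slice_to lines hmax]
    congr 1
    omega
  have hle : line_idx.toNat ≤ lines.length := by
    unfold Pre_find_line_doc_comment_py at hpre; omega
  rw [hslice, pvALoop_eq_spine lines _ [] hle, pvBLoop_eq_spine]
  simp
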